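-- pv_equiv track=rewrite | github.com/ebagos/python | rled/rled.py | brld
-- ===== SOURCE A (Python) =====
-- def crld(dat):
--     rc = []
--     for (rf, cnt) in dat:
--         rc += [rf] * cnt
--     return rc
--
-- def brld(dat):
--     rc = []
--     tmp = crld(dat)
--     for i in range(0, len(tmp), 8):
--         x = 0
--         for s in reversed(range(8)):
--             if i + 7 - s > len(tmp) - 1: break
--             x += tmp[i + 7 - s] << s
--         rc.append(x)
--     return rc
-- ===== SOURCE B (Python) =====
-- def brld(dat):
--     # One pass over the (value, count) runs: fill the current partial byte,
--     # emit the run's full bytes in bulk, keep the left-aligned remainder.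
--     rc = []
--     x = 0
--     nbits = 0
--     for (rf, cnt) in dat:
--         if cnt <= 0:
--             continue
--         if nbits:
--             t = cnt if cnt < 8 - nbits else 8 - nbits
--             x += rf * (((1 << t) - 1) << (8 - nbits - t))
--             nbits += t
--             cnt -= t
--             if nbits == 8:
--                 rc.append(x)
--                 x = 0
--                 nbits = 0
--         full, rem = divmod(cnt, 8)
--         if full:
--             rc.extend([rf * 255] * full)
--         if rem:
--             x = rf * (((1 << rem) - 1) << (8 - rem))
--             nbits = rem
--     if nbits:
--         rc.append(x)
--     return rc
-- ===== Notes on version B (the rewrite author's own statement) =====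
-- stated objective: faster
-- what changed: B streams over the (value, count) runs in one pass, filling the current partial byte and emitting each run's full bytes in bulk with closed-form arithmetic, instead of A's two phases that first materialise the full RLE-expanded bit list and then index into it chunk by chunk.
import Mathlib
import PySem

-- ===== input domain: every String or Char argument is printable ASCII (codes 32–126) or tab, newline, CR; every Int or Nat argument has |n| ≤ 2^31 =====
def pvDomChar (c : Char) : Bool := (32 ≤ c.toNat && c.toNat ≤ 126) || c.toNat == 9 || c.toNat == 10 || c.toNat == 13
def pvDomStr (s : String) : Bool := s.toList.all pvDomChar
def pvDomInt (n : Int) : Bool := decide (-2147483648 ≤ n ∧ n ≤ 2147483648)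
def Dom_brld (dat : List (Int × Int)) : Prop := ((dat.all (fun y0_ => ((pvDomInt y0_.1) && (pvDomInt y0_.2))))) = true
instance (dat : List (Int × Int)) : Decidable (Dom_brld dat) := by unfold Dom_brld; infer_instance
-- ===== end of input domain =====

-- B replaces A's two phases (materialise the RLE-expanded list, then index into it
-- in chunks of 8) by one streaming pass over the runs with a bit accumulator.

-- ===== PORT A =====
-- crld: rc += [rf] * cnt  ([rf]*cnt is empty for cnt ≤ 0, i.e. List.replicate cnt.toNat rf)
def crldL (dat : List (Int × Int)) : List Int :=
  dat.foldl (fun rc p => rc ++ List.replicate p.2.toNat p.1) []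

-- inner loop 'for s in reversed(range(8)): if i+7-s > len(tmp)-1: break; x += tmp[i+7-s] << s'
-- (the guard guarantees the index is in range, so pyGetD's default is never used;
--  'v << s' with s ≥ 0 is v * 2 ^ s)
def innerA (tmp : List Int) (i : Int) : List Int → Int → Int
  | [], x => x
  | s :: rest, x =>
    if i + 7 - s > (tmp.length : Int) - 1 then x
    else innerA tmp i rest (x + PySem.List.pyGetD tmp (i + 7 - s) 0 * 2 ^ s.toNat)

def brld (dat : List (Int × Int)) : List Int :=
  let tmp := crldL dat
  (PySem.List.pyRange 0 (tmp.length : Int) 8).foldl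
    (fun rc i => rc ++ [innerA tmp i (PySem.List.pyRange 7 (-1) (-1)) 0]) []

-- ===== PORT B =====
-- tail of the loop body: full, rem = divmod(cnt, 8); bulk-extend full bytes;
-- keep the left-aligned remainder ('1 << t' is 2 ^ t, '<< k' is * 2 ^ k)
def tailB (rc : List Int) (x : Int) (nb : Nat) (rf cnt : Int) : List Int × Int × Nat :=
  let full := PySem.Int.floordiv cnt 8
  let rem := PySem.Int.mod cnt 8
  let rc := if full ≠ 0 then rc ++ List.replicate full.toNat (rf * 255) else rc
  if rem ≠ 0 then (rc, rf * ((2 ^ rem.toNat - 1) * 2 ^ (8 - rem.toNat)), rem.toNat)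
  else (rc, x, nb)

-- one run (rf, cnt): 'continue' on cnt <= 0, fill the current partial byte, then tailB
def runStep (st : List Int × Int × Nat) (p : Int × Int) : List Int × Int × Nat :=
  if p.2 ≤ 0 then st
  else if st.2.2 ≠ 0 then
    let t : Nat := if p.2 < 8 - (st.2.2 : Int) then p.2.toNat else 8 - st.2.2
    let x := st.2.1 + p.1 * ((2 ^ t - 1) * 2 ^ (8 - st.2.2 - t))
    let nb := st.2.2 + t
    if nb = 8 then tailB (st.1 ++ [x]) 0 0 p.1 (p.2 - t)
    else tailB st.1 x nb p.1 (p.2 - t)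
  else tailB st.1 st.2.1 st.2.2 p.1 p.2

def brld_alt (dat : List (Int × Int)) : List Int :=
  let st := dat.foldl runStep ([], 0, 0)
  if st.2.2 ≠ 0 then st.1 ++ [st.2.1] else st.1

-- ===== PRECONDITION & SPEC =====
def Spec_brld (dat : List (Int × Int)) (out : List Int) : Prop := out = brld_alt dat
instance (dat : List (Int × Int)) (out : List Int) : Decidable (Spec_brld dat out) := by unfold Spec_brld; infer_instance

-- ===== CLAIM (what is proved, stated in full; the proofs are below) =====
def Claim_equal_brld : Prop := ∀ (dat : List (Int × Int)), Dom_brld dat → Spec_brld dat (brld dat)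

-- ===== LEMMAS AND PROOFS =====

-- value of a (≤ 8)-bit chunk, MSB worth 2^k
def byteV : List Int → Nat → Int
  | [], _ => 0
  | b :: bs, k => b * 2 ^ k + byteV bs (k - 1)

-- common specification: pack the expanded list in chunks of 8, MSB first
def packBytes : List Int → List Int
  | [] => []
  | x :: rest => byteV ((x :: rest).take 8) 7 :: packBytes ((x :: rest).drop 8)
termination_by l => l.length
decreasing_by simp [List.length_drop]

-- the literal list reversed(range(8)) as a countdown
def cdL : Nat → List Int
  | 0 => [0]
  | s + 1 => ((s + 1 : Nat) : Int) :: cdL s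

lemma cdL7 : PySem.List.pyRange 7 (-1) (-1) = cdL 7 := by decide

def flushB (st : List Int × Int × Nat) : List Int :=
  if st.2.2 ≠ 0 then st.1 ++ [st.2.1] else st.1

-- per-bit reference step (proof-only): B's run-level arithmetic is proved equal to
-- folding this single-bit step over the expanded run
def stepB (st : List Int × Int × Nat) (rf : Int) : List Int × Int × Nat :=
  let x := st.2.1 + rf * 2 ^ (7 - st.2.2)
  if st.2.2 + 1 = 8 then (st.1 ++ [x], 0, 0) else (st.1, x, st.2.2 + 1)

lemma innerA_cd (tmp : List Int) : ∀ (s : Nat), s ≤ 7 → ∀ (i x : Int), 0 ≤ i →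
    innerA tmp i (cdL s) x
      = x + byteV ((tmp.drop (i + 7 - s).toNat).take (s + 1)) s := by
  intro s
  induction s with
  | zero =>
    intro _ i x hi
    simp only [cdL, innerA]
    split_ifs with h
    · have hd : tmp.drop (i + 7 - ((0 : Nat) : Int)).toNat = [] :=
        List.drop_eq_nil_of_le (by omega)
      rw [hd]
      simp [byteV]
    · simp only [Nat.cast_zero]
      have hp0 : (0 : Int) ≤ i + 7 - 0 := by omega
      have hlt : (i + 7 - 0).toNat < tmp.length := by omega
      rw [PySem.List.pyGetD_of_nonneg tmp 0 hp0]
      rw [List.getD_eq_getElem tmp 0 hlt]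
      rw [List.drop_eq_getElem_cons hlt, List.take_succ_cons]
      simp [byteV]
  | succ s ih =>
    intro hs i x hi
    simp only [cdL, innerA]
    split_ifs with h
    · have hd : tmp.drop (i + 7 - ((s + 1 : Nat) : Int)).toNat = [] :=
        List.drop_eq_nil_of_le (by omega)
      rw [hd]
      simp [byteV]
    · have hp0 : (0 : Int) ≤ i + 7 - ((s + 1 : Nat) : Int) := by push_cast; omega
      have hlt : (i + 7 - ((s + 1 : Nat) : Int)).toNat < tmp.length := by omega
      have hcast : (((s + 1 : Nat) : Int)).toNat = s + 1 := by omega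
      rw [PySem.List.pyGetD_of_nonneg tmp 0 hp0]
      rw [List.getD_eq_getElem tmp 0 hlt]
      rw [hcast]
      rw [ih (by omega) i (x + tmp[(i + 7 - ((s + 1 : Nat) : Int)).toNat] * 2 ^ (s + 1)) hi]
      have hsucc : (i + 7 - (s : Int)).toNat = (i + 7 - ((s + 1 : Nat) : Int)).toNat + 1 := by
        omega
      rw [hsucc]
      rw [List.drop_eq_getElem_cons hlt]
      rw [List.take_succ_cons]
      simp only [byteV, Nat.add_sub_cancel]
      ring

lemma innerA_full (tmp : List Int) (i : Int) (hi : 0 ≤ i) :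
    innerA tmp i (PySem.List.pyRange 7 (-1) (-1)) 0
      = byteV ((tmp.drop i.toNat).take 8) 7 := by
  rw [cdL7, innerA_cd tmp 7 (by omega) i 0 hi]
  simp

-- A's outer loop, after conversion to a map over chunk indices, is packBytes
lemma Amap (tmp : List Int) :
    (List.range (if (0 : Int) < (tmp.length : Int)
        then (((tmp.length : Int) - 0 + 8 - 1) / 8).toNat else 0)).map
      (fun k => byteV ((tmp.drop (8 * k)).take 8) 7) = packBytes tmp := by
  induction tmp using packBytes.induct with
  | case1 => simp [packBytes]
  | case2 x rest ih =>
    have hlen : (0 : Int) < ((x :: rest).length : Int) := by simp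
    set n : Nat := (x :: rest).length with hn
    have hdlen : ((x :: rest).drop 8).length = n - 8 := by simp [hn]
    set m : Nat := (if (0 : Int) < (((x :: rest).drop 8).length : Int)
        then (((((x :: rest).drop 8).length : Int) - 0 + 8 - 1) / 8).toNat else 0) with hm
    have hcnt : (if (0 : Int) < (n : Int) then (((n : Int) - 0 + 8 - 1) / 8).toNat else 0) = m + 1 := by
      rw [hm, hdlen]
      have h1 : 1 ≤ n := by simp [hn]
      split_ifs <;> omega
    rw [show ((x :: rest).length : Int) = (n : Int) by rw [hn], hcnt,
      List.range_succ_eq_map, List.map_cons, List.map_map]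
    conv_rhs => rw [packBytes]
    have htail : List.map ((fun k => byteV (List.take 8 (List.drop (8 * k) (x :: rest))) 7) ∘ Nat.succ)
        (List.range m) = packBytes (List.drop 7 rest) := by
      rw [show List.drop 7 rest = List.drop 8 (x :: rest) from rfl, ← ih]
      apply List.map_congr_left
      intro k _
      simp only [Function.comp_apply, Nat.succ_eq_add_one]
      rw [show 8 * (k + 1) = 8 + 8 * k by ring, ← List.drop_drop]
    rw [htail]
    simp

-- B's step fold only appends to its list component
lemma foldl_stepB_rc : ∀ (l : List Int) (rc : List Int) (x : Int) (nb : Nat),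
    List.foldl stepB (rc, x, nb) l =
      (rc ++ (List.foldl stepB ([], x, nb) l).1,
       (List.foldl stepB ([], x, nb) l).2.1,
       (List.foldl stepB ([], x, nb) l).2.2) := by
  intro l
  induction l with
  | nil => intro rc x nb; simp
  | cons a l ih =>
    intro rc x nb
    by_cases h : nb + 1 = 8
    · simp only [List.foldl_cons, stepB, h, if_pos, List.nil_append]
      rw [ih (rc ++ [x + a * 2 ^ (7 - nb)]), ih [x + a * 2 ^ (7 - nb)]]
      simp
    · simp only [List.foldl_cons, stepB, h, if_neg, not_false_iff]
      exact ih rc _ _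

lemma flushB_append (rc r : List Int) (x : Int) (nb : Nat) :
    flushB (rc ++ r, x, nb) = rc ++ flushB (r, x, nb) := by
  unfold flushB
  split <;> simp

-- a full chunk of 8 produces one byte and resets the accumulator
lemma chunk_full (a b c d e f g h : Int) :
    List.foldl stepB ([], 0, 0) [a, b, c, d, e, f, g, h]
      = ([byteV [a, b, c, d, e, f, g, h] 7], 0, 0) := by
  simp [stepB, byteV]
  ring

lemma Bmain (tmp : List Int) :
    flushB (List.foldl stepB ([], 0, 0) tmp) = packBytes tmp := by
  induction tmp using packBytes.induct with
  | case1 => simp [packBytes, flushB]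
  | case2 a rest ih =>
    rcases rest with _ | ⟨b, rest⟩
    · simp [packBytes, stepB, flushB, byteV]
    rcases rest with _ | ⟨c, rest⟩
    · simp [packBytes, stepB, flushB, byteV]; try ring
    rcases rest with _ | ⟨d, rest⟩
    · simp [packBytes, stepB, flushB, byteV]; try ring
    rcases rest with _ | ⟨e, rest⟩
    · simp [packBytes, stepB, flushB, byteV]; try ring
    rcases rest with _ | ⟨f, rest⟩
    · simp [packBytes, stepB, flushB, byteV]; try ring
    rcases rest with _ | ⟨g, rest⟩
    · simp [packBytes, stepB, flushB, byteV]; try ring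
    rcases rest with _ | ⟨h, rest⟩
    · simp [packBytes, stepB, flushB, byteV]; try ring
    rcases rest with _ | ⟨i, rest⟩
    · simp [packBytes, stepB, flushB, byteV]; try ring
    · -- at least 8 elements: split off the first chunk
      have hsplit : a :: b :: c :: d :: e :: f :: g :: h :: i :: rest
          = [a, b, c, d, e, f, g, h] ++ (i :: rest) := by simp
      rw [hsplit, List.foldl_append, chunk_full,
        foldl_stepB_rc (i :: rest) [byteV [a, b, c, d, e, f, g, h] 7] 0 0]
      have hfl : flushB (List.foldl stepB ([], 0, 0) (i :: rest)) = packBytes (i :: rest) := by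
        simpa using ih
      rw [show ((a :: b :: c :: d :: e :: f :: g :: h :: i :: rest).drop 8) = i :: rest by simp] at ih
      rw [flushB_append]
      rw [show (List.foldl stepB ([], 0, 0) (i :: rest)).1 = (List.foldl stepB ([], 0, 0) (i :: rest)).1 from rfl]
      have : ((List.foldl stepB ([], 0, 0) (i :: rest)).1,
              (List.foldl stepB ([], 0, 0) (i :: rest)).2.1,
              (List.foldl stepB ([], 0, 0) (i :: rest)).2.2)
            = List.foldl stepB ([], 0, 0) (i :: rest) := by simp
      rw [this, ih]
      simp [packBytes]

lemma brld_eq_packBytes (dat : List (Int × Int)) :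
    brld dat = packBytes (crldL dat) := by
  unfold brld
  set tmp := crldL dat with htmp
  rw [PySem.List.foldl_append_singleton_eq_map]
  rw [PySem.List.pyRange_of_pos 0 (tmp.length : Int) (by norm_num)]
  rw [List.map_map, ← Amap tmp]
  simp only [List.nil_append]
  apply List.map_congr_left
  intro k _
  simp only [Function.comp_apply]
  rw [innerA_full tmp (0 + 8 * (k : Int)) (by positivity)]
  have hk : ((0 : Int) + 8 * (k : Int)).toNat = 8 * k := by omega
  rw [hk]

lemma fill_phase : ∀ (k : Nat) (rf : Int) (rc : List Int) (x : Int) (nb : Nat), nb + k ≤ 8 →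
    List.foldl stepB (rc, x, nb) (List.replicate k rf)
      = if nb + k = 8 ∧ 0 < k
        then (rc ++ [x + rf * ((2 ^ k - 1) * 2 ^ (8 - nb - k))], 0, 0)
        else (rc, x + rf * ((2 ^ k - 1) * 2 ^ (8 - nb - k)), nb + k) := by
  intro k
  induction k with
  | zero =>
    intro rf rc x nb _
    simp
  | succ k ih =>
    intro rf rc x nb hk
    rw [show List.replicate (k + 1) rf = rf :: List.replicate k rf from rfl, List.foldl_cons]
    by_cases h8 : nb + 1 = 8
    · have hnb : nb = 7 := by omega
      have hk0 : k = 0 := by omega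
      subst hnb hk0
      simp [stepB]
    · rw [show stepB (rc, x, nb) rf = (rc, x + rf * 2 ^ (7 - nb), nb + 1) from by
        simp [stepB, h8]]
      rw [ih rf rc (x + rf * 2 ^ (7 - nb)) (nb + 1) (by omega)]
      have hval : x + rf * 2 ^ (7 - nb) + rf * ((2 ^ k - 1) * 2 ^ (8 - (nb + 1) - k))
          = x + rf * ((2 ^ (k + 1) - 1) * 2 ^ (8 - nb - (k + 1))) := by
        have h7 : 7 - nb = k + (8 - nb - (k + 1)) := by omega
        have h81 : 8 - (nb + 1) - k = 8 - nb - (k + 1) := by omega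
        rw [h7, h81, pow_add, pow_succ]
        ring
      by_cases hcnd : nb + (k + 1) = 8
      · have hk0 : 0 < k := by omega
        rw [if_pos (show nb + 1 + k = 8 ∧ 0 < k by omega),
          if_pos (show nb + (k + 1) = 8 ∧ 0 < k + 1 by omega), hval]
      · rw [if_neg (show ¬(nb + 1 + k = 8 ∧ 0 < k) by omega),
          if_neg (show ¬(nb + (k + 1) = 8 ∧ 0 < k + 1) by omega), hval,
          show nb + 1 + k = nb + (k + 1) by omega]

lemma full_phase : ∀ (q : Nat) (rf : Int) (rc : List Int),
    List.foldl stepB (rc, 0, 0) (List.replicate (8 * q) rf)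
      = (rc ++ List.replicate q (rf * 255), 0, 0) := by
  intro q
  induction q with
  | zero => intro rf rc; simp
  | succ q ih =>
    intro rf rc
    rw [show 8 * (q + 1) = 8 + 8 * q by ring, List.replicate_add, List.foldl_append,
      fill_phase 8 rf rc 0 0 (by omega), if_pos ⟨rfl, by omega⟩, ih,
      show (0 : Int) + rf * ((2 ^ 8 - 1) * 2 ^ (8 - 0 - 8)) = rf * 255 by norm_num,
      List.append_assoc,
      show [rf * 255] ++ List.replicate q (rf * 255) = List.replicate (q + 1) (rf * 255) from rfl]

lemma pyfloordiv8 (c : Int) : PySem.Int.floordiv c 8 = c / 8 := by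
  simp [PySem.Int.floordiv]; rw [Int.fdiv_eq_ediv]; simp

lemma pymod8 (c : Int) : PySem.Int.mod c 8 = c % 8 := by
  simp [PySem.Int.mod]; rw [Int.fmod_eq_emod]; simp

lemma tailB_eq (rc : List Int) (rf c : Int) (hc : 0 ≤ c) :
    tailB rc 0 0 rf c = List.foldl stepB (rc, 0, 0) (List.replicate c.toNat rf) := by
  simp only [tailB, pyfloordiv8, pymod8]
  rw [show c.toNat = 8 * (c / 8).toNat + (c % 8).toNat by omega, List.replicate_add,
    List.foldl_append, full_phase, fill_phase _ rf _ 0 0 (by omega),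
    if_neg (show ¬(0 + (c % 8).toNat = 8 ∧ 0 < (c % 8).toNat) by omega)]
  by_cases hq : c / 8 = 0 <;> by_cases hr : c % 8 = 0 <;> simp [hq, hr]

lemma tailB_zero (rc : List Int) (x : Int) (nb : Nat) (rf : Int) :
    tailB rc x nb rf 0 = (rc, x, nb) := by
  simp [tailB]

lemma runStep_eq (st : List Int × Int × Nat) (p : Int × Int)
    (hnb : st.2.2 < 8) (hx : st.2.2 = 0 → st.2.1 = 0) :
    runStep st p = List.foldl stepB st (List.replicate p.2.toNat p.1) := by
  obtain ⟨rc, x, nb⟩ := st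
  obtain ⟨rf, c⟩ := p
  simp only at hnb hx
  by_cases hc0 : c ≤ 0
  · simp [runStep, hc0, Int.toNat_of_nonpos hc0]
  · by_cases hnb0 : nb = 0
    · subst hnb0
      have hx0 : x = 0 := hx rfl
      subst hx0
      simp only [runStep]
      rw [if_neg hc0, if_neg (by simp)]
      exact tailB_eq rc rf c (by omega)
    · simp only [runStep]
      rw [if_neg hc0, if_pos (by simpa using hnb0)]
      set t : Nat := if c < 8 - (nb : Int) then c.toNat else 8 - nb with ht
      have ht8 : nb + t ≤ 8 := by rw [ht]; split_ifs <;> omega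
      have ht0 : 0 < t := by rw [ht]; split_ifs <;> omega
      have htc : (t : Int) ≤ c := by rw [ht]; split_ifs <;> omega
      rw [show c.toNat = t + (c - (t : Int)).toNat by omega, List.replicate_add,
        List.foldl_append, fill_phase t rf rc x nb ht8]
      by_cases hfull : nb + t = 8
      · rw [if_pos hfull, if_pos ⟨hfull, ht0⟩]
        exact tailB_eq _ rf (c - t) (by omega)
      · have hteq : t = c.toNat := by
          by_cases hlt : c < 8 - (nb : Int)
          · rw [ht, if_pos hlt]
          · exfalso; apply hfull; rw [ht, if_neg hlt]; omega
        have hct : c - (t : Int) = 0 := by omega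
        rw [if_neg hfull, if_neg (show ¬(nb + t = 8 ∧ 0 < t) by omega), hct, tailB_zero]
        simp

lemma foldl_stepB_inv : ∀ (l : List Int) (st : List Int × Int × Nat),
    st.2.2 < 8 → (st.2.2 = 0 → st.2.1 = 0) →
    (List.foldl stepB st l).2.2 < 8 ∧
      ((List.foldl stepB st l).2.2 = 0 → (List.foldl stepB st l).2.1 = 0) := by
  intro l
  induction l with
  | nil => intro st h1 h2; exact ⟨h1, h2⟩
  | cons a l ih =>
    intro st h1 h2
    rw [List.foldl_cons]
    by_cases h8 : st.2.2 + 1 = 8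
    · exact ih _ (by simp [stepB, h8]) (by simp [stepB, h8])
    · refine ih _ ?_ ?_ <;> (simp [stepB, h8]; try omega)

lemma run_flat : ∀ (dat : List (Int × Int)) (st : List Int × Int × Nat),
    st.2.2 < 8 → (st.2.2 = 0 → st.2.1 = 0) →
    List.foldl runStep st dat
      = List.foldl stepB st (dat.flatMap (fun p => List.replicate p.2.toNat p.1)) := by
  intro dat
  induction dat with
  | nil => intro st _ _; simp
  | cons p dat ih =>
    intro st h1 h2
    rw [List.foldl_cons, List.flatMap_cons, List.foldl_append, runStep_eq st p h1 h2]
    exact ih _ (foldl_stepB_inv _ st h1 h2).1 (foldl_stepB_inv _ st h1 h2).2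

lemma brld_alt_eq_packBytes (dat : List (Int × Int)) :
    brld_alt dat = packBytes (crldL dat) := by
  have hcrld : crldL dat
      = dat.flatMap (fun p => List.replicate p.2.toNat p.1) := by
    unfold crldL
    rw [PySem.List.foldl_append_eq_flatMap]
    simp
  have h0 : brld_alt dat = flushB (dat.foldl runStep ([], 0, 0)) := rfl
  rw [h0, run_flat dat ([], 0, 0) (by norm_num) (fun _ => rfl), ← hcrld]
  exact Bmain (crldL dat)

-- ===== VERDICT (by name: the statement is the Claim_ definition above) =====
theorem brld_spec : Claim_equal_brld := by
  intro dat _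
  unfold Spec_brld
  rw [brld_eq_packBytes, brld_alt_eq_packBytes]
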